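-- pv_equiv track=rewrite | github.com/avasserman/building-search-engine-depaul-csc-299-winter2023 | hw1.py | get_word_spans
-- ===== SOURCE A (Python) =====
-- import typing
--
-- class Span(typing.NamedTuple):
--     """
-- A representation of a substring in a shared text string.
-- text[start_pos:end_pos] will return the actual substring.
-- """
--     text: str
--     start_pos: int
--     end_pos: int
--
--     def get_substring(self):
--         return self.text[self.start_pos:self.end_pos]
--
-- def get_word_spans(text):
--         text = text.lower()
--         spans = {}
--         dummy = []
--         start_pos = 0
--         for i, char in enumerate(text):
--             if char == ' ':
--                 s = Span(text, start_pos=start_pos, end_pos=i)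
--                 sub = s.get_substring()
--                 if sub in spans:
--                     spans[sub].append(s)
--                     start_pos = i + 1
--                 else:
--                     dummy.append(s)
--                     spans[sub] = dummy
--                     start_pos = i + 1
--                     dummy = []
--
--         if start_pos < len(text):
--             s = Span(text, start_pos, end_pos=len(text))
--             sub = s.get_substring()
--             if sub in spans:
--                 spans[sub].append(s)
--             else:
--                 dummy.append(s)
--                 spans[sub] = dummy
--         return spans
-- ===== SOURCE B (Python) =====
-- import typing
--
-- class Span(typing.NamedTuple):
--     text: str
--     start_pos: int
--     end_pos: int
--
--     def get_substring(self):
--         return self.text[self.start_pos:self.end_pos]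
--
-- def get_word_spans(text):
--     text = text.lower()
--     tokens = text.split(' ')
--     if tokens and tokens[-1] == '':
--         tokens.pop()
--     spans = {}
--     start = 0
--     for word in tokens:
--         spans.setdefault(word, []).append(Span(text, start, start + len(word)))
--         start += len(word) + 1
--     return spans
-- ===== Notes on version B (the rewrite author's own statement) =====
-- stated objective: simpler
-- what changed: A scans the text character by character with explicit start_pos and a dummy-list buffer, slicing a word out at each space plus a separate trailing-word step; B lowercases, splits the text on the space separator, drops a trailing empty token, and walks the tokens with a running cursor, grouping spans via setdefault.
import Mathlib
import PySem

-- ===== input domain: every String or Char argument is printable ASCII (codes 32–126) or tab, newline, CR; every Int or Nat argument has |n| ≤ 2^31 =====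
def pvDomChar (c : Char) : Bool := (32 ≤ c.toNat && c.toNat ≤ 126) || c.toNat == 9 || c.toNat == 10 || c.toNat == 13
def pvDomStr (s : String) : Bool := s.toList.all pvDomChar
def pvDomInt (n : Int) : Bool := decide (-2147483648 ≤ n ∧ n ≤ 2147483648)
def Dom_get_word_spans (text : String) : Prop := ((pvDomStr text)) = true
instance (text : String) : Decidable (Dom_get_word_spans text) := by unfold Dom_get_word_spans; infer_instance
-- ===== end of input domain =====

-- B replaces A's character-by-character scan (explicit start_pos/dummy bookkeeping) by
-- split-on-space plus a running cursor: simpler, same exact dict (keys, order, spans).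

-- ===== PORT A =====
-- loop body of A's `for i, char in enumerate(text)` (state: spans, dummy, start_pos)
def pvAStep (t : String)
    (st : PySem.Dict String (List (String × Int × Int)) × List (String × Int × Int) × Int)
    (p : Int × Char) :
    PySem.Dict String (List (String × Int × Int)) × List (String × Int × Int) × Int :=
  if p.2 = ' ' then
    let s : String × Int × Int := (t, st.2.2, p.1)
    let sub := PySem.Str.slice t (some st.2.2) (some p.1)
    if st.1.contains sub then (st.1.modify sub [] (· ++ [s]), st.2.1, p.1 + 1)
    else (st.1.insert sub (st.2.1 ++ [s]), [], p.1 + 1)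
  else st

-- A's trailing `if start_pos < len(text): …`
def pvATail (t : String)
    (st : PySem.Dict String (List (String × Int × Int)) × List (String × Int × Int) × Int) :
    PySem.Dict String (List (String × Int × Int)) :=
  if st.2.2 < PySem.Str.len t then
    let s : String × Int × Int := (t, st.2.2, PySem.Str.len t)
    let sub := PySem.Str.slice t (some st.2.2) (some (PySem.Str.len t))
    if st.1.contains sub then st.1.modify sub [] (· ++ [s])
    else st.1.insert sub (st.2.1 ++ [s])
  else st.1

def get_word_spans (text : String) : List (String × List (String × Int × Int)) :=
  let t := PySem.Str.lower text
  (pvATail t ((PySem.List.enumerate t.toList).foldl (pvAStep t) (PySem.Dict.empty, [], 0))).items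

-- ===== PORT B =====
-- loop body of B's `for word in tokens` (state: spans, start)
def pvBStep (t : String)
    (st : PySem.Dict String (List (String × Int × Int)) × Int) (w : String) :
    PySem.Dict String (List (String × Int × Int)) × Int :=
  (st.1.modify w [] (· ++ [(t, st.2, st.2 + PySem.Str.len w)]), st.2 + PySem.Str.len w + 1)

def get_word_spans_alt (text : String) : List (String × List (String × Int × Int)) :=
  let t := PySem.Str.lower text
  let tokens := (PySem.Str.split? t " ").getD []
  let tokens := if tokens ≠ [] ∧ PySem.List.pyGetD tokens (-1) "" = "" then tokens.dropLast else tokens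
  (tokens.foldl (pvBStep t) (PySem.Dict.empty, 0)).1.items

-- ===== PRECONDITION & SPEC =====
def Spec_get_word_spans (text : String) (out : List (String × List (String × Int × Int))) : Prop := out = get_word_spans_alt text
instance (text : String) (out : List (String × List (String × Int × Int))) : Decidable (Spec_get_word_spans text out) := by unfold Spec_get_word_spans; infer_instance

-- ===== CLAIM (what is proved, stated in full; the proofs are below) =====
def Claim_equal_get_word_spans : Prop := ∀ (text : String), Dom_get_word_spans text → Spec_get_word_spans text (get_word_spans text)

-- ===== LEMMAS AND PROOFS =====

-- structural form of text.split(' ')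
def pvSplit : List Char → List (List Char)
  | [] => [[]]
  | c :: cs =>
    if c = ' ' then [] :: pvSplit cs
    else
      match pvSplit cs with
      | [] => [[c]]
      | h :: tl => (c :: h) :: tl

def pvPrepend (p : List Char) : List (List Char) → List (List Char)
  | [] => [p]
  | h :: tl => (p ++ h) :: tl

-- B's drop-trailing-empty-token guard, on the char-list side
def pvDropEmptyLast (ts : List (List Char)) : List (List Char) :=
  if ts.getLast? = some [] then ts.dropLast else ts

lemma pvSplit_ne_nil (cs : List Char) : pvSplit cs ≠ [] := by
  induction cs with
  | nil => simp [pvSplit]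
  | cons c cs ih =>
    simp only [pvSplit]
    split
    · simp
    · cases h : pvSplit cs <;> simp

lemma pvGo_spec : ∀ (fuel : Nat) (l cur : List Char) (acc : List (List Char)),
    l.length < fuel →
    PySem.Chars.splitOn.go [' '] fuel l cur acc = acc.reverse ++ pvPrepend cur.reverse (pvSplit l) := by
  intro fuel
  induction fuel with
  | zero => intro l cur acc h; omega
  | succ fuel ih =>
    intro l cur acc h
    cases l with
    | nil => simp [PySem.Chars.splitOn.go, pvSplit, pvPrepend]
    | cons c rest =>
      by_cases hc : c = ' '
      · subst hc
        have hpre : List.isPrefixOf [' '] (' ' :: rest) = true := by simp [List.isPrefixOf]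
        rw [PySem.Chars.splitOn.go]
        simp only [hpre, if_pos, List.length_cons, List.length_nil, List.drop_succ_cons,
          List.drop_zero, Nat.zero_add]
        rw [ih rest [] (cur.reverse :: acc) (by simpa using Nat.lt_of_succ_lt_succ h)]
        have hne := pvSplit_ne_nil rest
        cases hs : pvSplit rest with
        | nil => exact absurd hs hne
        | cons h0 tl => simp [pvSplit, pvPrepend, hs]
      · have hpre : List.isPrefixOf [' '] (c :: rest) = false := by
          simp [List.isPrefixOf]; exact fun hh => absurd hh.symm hc
        rw [PySem.Chars.splitOn.go]
        simp only [hpre, Bool.false_eq_true, if_neg, not_false_iff]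
        rw [ih rest (c :: cur) acc (by simpa using Nat.lt_of_succ_lt_succ h)]
        have hne := pvSplit_ne_nil rest
        cases hs : pvSplit rest with
        | nil => exact absurd hs hne
        | cons h0 tl => simp [pvSplit, pvPrepend, hs, hc]

lemma pvSplitOn_space (l : List Char) : PySem.Chars.splitOn l [' '] = pvSplit l := by
  rw [PySem.Chars.splitOn, pvGo_spec (l.length + 1) l [] [] (by omega)]
  have hne := pvSplit_ne_nil l
  cases hs : pvSplit l with
  | nil => exact absurd hs hne
  | cons h0 tl => simp [pvPrepend]

lemma pvEnumerate_append {α : Type} (xs ys : List α) (s : Int) :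
    PySem.List.enumerate (xs ++ ys) s
      = PySem.List.enumerate xs s ++ PySem.List.enumerate ys (s + xs.length) := by
  induction xs generalizing s with
  | nil => simp [PySem.List.enumerate]
  | cons x xs ih =>
    simp [PySem.List.enumerate_cons, ih (s+1)]
    ring_nf

lemma pvSkip (t : String) (w : List Char) (hw : ∀ c ∈ w, c ≠ ' ') :
    ∀ (s : Int) st, (PySem.List.enumerate w s).foldl (pvAStep t) st = st := by
  induction w with
  | nil => intro s st; simp [PySem.List.enumerate]
  | cons c cs ih =>
    intro s st
    have hc : c ≠ ' ' := hw c (by simp)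
    rw [PySem.List.enumerate_cons]
    simp only [List.foldl_cons]
    rw [show pvAStep t st (s, c) = st by simp [pvAStep, hc]]
    exact ih (fun x hx => hw x (by simp [hx])) (s+1) st

lemma pvSplit_nonspace (w : List Char) (hw : ∀ c ∈ w, c ≠ ' ') : pvSplit w = [w] := by
  induction w with
  | nil => rfl
  | cons c cs ih =>
    have hc : c ≠ ' ' := hw c (by simp)
    simp only [pvSplit, if_neg hc, ih (fun x hx => hw x (by simp [hx]))]

lemma pvSplit_nonspace_cons (w r : List Char) (hw : ∀ c ∈ w, c ≠ ' ') :
    pvSplit (w ++ ' ' :: r) = w :: pvSplit r := by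
  induction w with
  | nil => simp [pvSplit]
  | cons c cs ih =>
    have hc : c ≠ ' ' := hw c (by simp)
    simp only [List.cons_append, pvSplit, if_neg hc, ih (fun x hx => hw x (by simp [hx]))]

lemma pvSlice_eq (t : String) (pre w r : List Char) (h : t.toList = pre ++ w ++ r) :
    PySem.Str.slice t (some (pre.length : Int)) (some ((pre.length : Int) + (w.length : Int)))
      = String.ofList w := by
  apply String.toList_inj.mp
  rw [PySem.Str.toList_slice, String.toList_ofList, h, PySem.Chars.slice,
    PySem.List.slice_natCast_add]
  simp

-- at a space, A's contains/append-vs-dummy-insert step is exactly a Dict.modify (dummy is [])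
lemma pvAStep_space (t : String) (d : PySem.Dict String (List (String × Int × Int)))
    (pos i : Int) :
    pvAStep t (d, [], pos) (i, ' ')
      = (d.modify (PySem.Str.slice t (some pos) (some i)) [] (· ++ [(t, pos, i)]), [], i + 1) := by
  unfold pvAStep
  by_cases hc : d.contains (PySem.Str.slice t (some pos) (some i))
  · simp [hc]
  · simp only [hc, Bool.false_eq_true, if_neg, not_false_iff]
    rw [PySem.Dict.modify, PySem.Dict.getD_of_not_contains d [] (by simpa using hc)]
    simp

lemma pvGetLast?_cons (w : List Char) (ts : List (List Char)) (h : ts ≠ []) :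
    (w :: ts).getLast? = ts.getLast? := by
  cases ts with
  | nil => exact absurd rfl h
  | cons a l => simp [List.getLast?_cons_cons]

lemma pvDropEmptyLast_cons (w : List Char) (ts : List (List Char)) (h : ts ≠ []) :
    pvDropEmptyLast (w :: ts) = w :: pvDropEmptyLast ts := by
  unfold pvDropEmptyLast
  rw [pvGetLast?_cons w ts h, List.dropLast_cons_of_ne_nil h]
  split <;> rfl

-- when start_pos < len, A's tail step is exactly a Dict.modify (dummy is [])
lemma pvATail_pos (t : String) (d : PySem.Dict String (List (String × Int × Int)))
    (pos : Int) (h : pos < PySem.Str.len t) :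
    pvATail t (d, [], pos)
      = d.modify (PySem.Str.slice t (some pos) (some (PySem.Str.len t))) []
          (· ++ [(t, pos, PySem.Str.len t)]) := by
  unfold pvATail
  dsimp only
  rw [if_pos h]
  split_ifs with hc
  · rfl
  · rw [PySem.Dict.modify, PySem.Dict.getD_of_not_contains d [] (by simpa using hc)]

-- both sides on an exhausted suffix
lemma pvBase (t : String) (pre : List Char) (ht : t.toList = pre)
    (d : PySem.Dict String (List (String × Int × Int))) :
    pvATail t ((PySem.List.enumerate ([] : List Char) (pre.length : Int)).foldl (pvAStep t)
        (d, [], (pre.length : Int)))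
      = (((pvDropEmptyLast (pvSplit [])).map String.ofList).foldl (pvBStep t)
          (d, (pre.length : Int))).1 := by
  have hlen : PySem.Str.len t = (pre.length : Int) := by rw [PySem.Str.len_eq, ht]
  rw [show PySem.List.enumerate ([] : List Char) (pre.length : Int) = [] from rfl,
    List.foldl_nil]
  unfold pvATail
  dsimp only
  rw [if_neg (by rw [hlen]; omega)]
  simp [pvSplit, pvDropEmptyLast]

lemma pvMain (t : String) : ∀ (n : Nat) (cs pre : List Char), cs.length ≤ n →
    t.toList = pre ++ cs →
    ∀ d : PySem.Dict String (List (String × Int × Int)),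
    pvATail t ((PySem.List.enumerate cs (pre.length : Int)).foldl (pvAStep t)
        (d, [], (pre.length : Int)))
      = (((pvDropEmptyLast (pvSplit cs)).map String.ofList).foldl (pvBStep t)
          (d, (pre.length : Int))).1 := by
  intro n
  induction n with
  | zero =>
    intro cs pre hlen ht d
    have hcs : cs = [] := List.eq_nil_of_length_eq_zero (Nat.le_zero.mp hlen)
    subst hcs
    exact pvBase t pre (by simpa using ht) d
  | succ n ih =>
    intro cs pre hlen ht d
    rcases eq_or_ne cs [] with hcs | hcs
    · subst hcs
      exact pvBase t pre (by simpa using ht) d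
    · have hw : ∀ c ∈ cs.takeWhile (fun x => x ≠ ' '), c ≠ ' ' := by
        intro c hc
        have := List.mem_takeWhile_imp hc
        simpa using this
      have hcat : cs.takeWhile (fun x => x ≠ ' ') ++ cs.dropWhile (fun x => x ≠ ' ') = cs :=
        List.takeWhile_append_dropWhile
      set w := cs.takeWhile (fun x => x ≠ ' ') with hwdef
      cases hr : cs.dropWhile (fun x => x ≠ ' ') with
      | nil =>
        have hcw : cs = w := by rw [← hcat, hr, List.append_nil]
        have hwne : w ≠ [] := hcw ▸ hcs
        have ht' : t.toList = pre ++ w ++ [] := by simpa using hcw ▸ ht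
        have hlen_t : PySem.Str.len t = (pre.length : Int) + (w.length : Int) := by
          rw [PySem.Str.len_eq, ht, hcw]
          push_cast [List.length_append]
          ring
        have hlt : (pre.length : Int) < PySem.Str.len t := by
          rw [hlen_t]
          have : 0 < w.length := List.length_pos_of_ne_nil hwne
          omega
        rw [hcw, pvSkip t w hw, pvATail_pos t d _ hlt,
          show PySem.Str.slice t (some (pre.length : Int)) (some (PySem.Str.len t))
              = String.ofList w by rw [hlen_t]; exact pvSlice_eq t pre w [] ht',
          pvSplit_nonspace w hw]
        have hdrop : pvDropEmptyLast [w] = [w] := by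
          simp [pvDropEmptyLast, hwne]
        rw [hdrop]
        simp only [List.map_cons, List.map_nil, List.foldl_cons, List.foldl_nil, pvBStep]
        rw [show PySem.Str.len (String.ofList w) = (w.length : Int) by
          rw [PySem.Str.len_eq, String.toList_ofList], ← hlen_t]
      | cons c r =>
        have hcsp : c = ' ' := by
          have hhead := List.head_dropWhile_not (fun x => decide (x ≠ ' ')) (l := cs)
            (w := by rw [hr]; simp)
          simp only [hr, List.head_cons] at hhead
          simpa using hhead
        subst hcsp
        have hcw : cs = w ++ ' ' :: r := by rw [← hcat, hr]
        have ht' : t.toList = (pre ++ w ++ [' ']) ++ r := by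
          rw [ht, hcw, List.append_assoc (pre ++ w) [' '] r, List.singleton_append, List.append_assoc]
        have hlenr : r.length ≤ n := by
          rw [hcw] at hlen
          simp [List.length_append] at hlen
          omega
        have hslice : PySem.Str.slice t (some (pre.length : Int))
            (some ((pre.length : Int) + (w.length : Int))) = String.ofList w :=
          pvSlice_eq t pre w (' ' :: r) (by rw [ht, hcw, List.append_assoc])
        have hpre' : (((pre ++ w ++ [' ']).length : Nat) : Int)
            = (pre.length : Int) + (w.length : Int) + 1 := by
          push_cast [List.length_append, List.length_cons, List.length_nil]
          ring
        rw [hcw, pvEnumerate_append, List.foldl_append, pvSkip t w hw,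
          PySem.List.enumerate_cons, List.foldl_cons, pvAStep_space, hslice,
          pvSplit_nonspace_cons w r hw, pvDropEmptyLast_cons w _ (pvSplit_ne_nil r),
          List.map_cons, List.foldl_cons]
        have hstep : pvBStep t (d, (pre.length : Int)) (String.ofList w)
            = (d.modify (String.ofList w) []
                (· ++ [(t, (pre.length : Int), (pre.length : Int) + (w.length : Int))]),
               (pre.length : Int) + (w.length : Int) + 1) := by
          simp only [pvBStep]
          rw [show PySem.Str.len (String.ofList w) = (w.length : Int) by
            rw [PySem.Str.len_eq, String.toList_ofList]]
        rw [hstep]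
        have := ih r (pre ++ w ++ [' ']) hlenr ht'
          (d.modify (String.ofList w) []
            (· ++ [(t, (pre.length : Int), (pre.length : Int) + (w.length : Int))]))
        rw [hpre'] at this
        exact this

lemma pvOfList_eq_empty (x : List Char) : String.ofList x = "" ↔ x = [] := by
  constructor
  · intro h
    have := congrArg String.toList h
    simpa using this
  · intro h; subst h; rfl

lemma pvTokens (ts : List (List Char)) (h : ts ≠ []) :
    (if ts.map String.ofList ≠ [] ∧ PySem.List.pyGetD (ts.map String.ofList) (-1) "" = ""
      then (ts.map String.ofList).dropLast else ts.map String.ofList)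
      = (pvDropEmptyLast ts).map String.ofList := by
  have hmne : ts.map String.ofList ≠ [] := by simpa using h
  have hget : PySem.List.pyGetD (ts.map String.ofList) (-1) ""
      = String.ofList (ts.getLast h) := by
    rw [PySem.List.pyGetD_neg_one _ _ hmne, List.getLast_map]
  by_cases hl : ts.getLast h = []
  · rw [if_pos ⟨hmne, by rw [hget, hl]⟩]
    unfold pvDropEmptyLast
    rw [List.getLast?_eq_some_getLast h, if_pos (by rw [hl]), ← List.map_dropLast]
  · rw [if_neg (by
      rintro ⟨-, hs⟩
      exact hl ((pvOfList_eq_empty _).mp (by rw [← hget, hs])))]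
    unfold pvDropEmptyLast
    rw [List.getLast?_eq_some_getLast h, if_neg (by simpa using hl)]

-- ===== VERDICT (by name: the statement is the Claim_ definition above) =====
theorem get_word_spans_spec : Claim_equal_get_word_spans := by
  intro text _
  unfold Spec_get_word_spans get_word_spans get_word_spans_alt
  dsimp only
  have hA := pvMain (PySem.Str.lower text) (PySem.Str.lower text).toList.length
    (PySem.Str.lower text).toList [] le_rfl (by simp) PySem.Dict.empty
  simp only [List.length_nil, Nat.cast_zero] at hA
  rw [hA]
  have hsplit : PySem.Str.split? (PySem.Str.lower text) " "
      = some ((pvSplit (PySem.Str.lower text).toList).map String.ofList) := by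
    rw [PySem.Str.split?]
    rw [show (" " : String).toList = [' '] from rfl, PySem.Chars.split?]
    simp [pvSplitOn_space]
  rw [hsplit]
  simp only [Option.getD_some]
  rw [pvTokens _ (pvSplit_ne_nil _)]
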